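-- pv_equiv track=rewrite | github.com/liran906/DSA | OJ/4_2.py | func
-- ===== SOURCE A (Python) =====
-- def func(mylist):
--     output = []
--     for _, i in enumerate(mylist):
--         cmin = i - 10000
--         count = 1
--         for j in range(_):
--             if mylist[j] >= cmin:
--                 count += 1
--         output.append(count)
--     return output
-- ===== SOURCE B (Python) =====
-- def _bisect_left(a, x):
--     lo, hi = 0, len(a)
--     while lo < hi:
--         mid = (lo + hi) // 2
--         if a[mid] < x:
--             lo = mid + 1
--         else:
--             hi = mid
--     return lo
--
--
-- def func(mylist):
--     seen = []      # sorted list of the elements already processed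
--     output = []
--     for x in mylist:
--         k = _bisect_left(seen, x - 10000)
--         output.append(len(seen) - k + 1)
--         seen.insert(_bisect_left(seen, x), x)
--     return output
-- ===== Notes on version B (the rewrite author's own statement) =====
-- stated objective: faster
-- what changed: Replaces the quadratic rescan of all prior elements per position by an incrementally maintained sorted list: a hand-written binary search locates the threshold x-10000 (count = elements at or above it, plus one) and the insertion point of x, so the Python-level inner loop disappears.
import Mathlib
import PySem

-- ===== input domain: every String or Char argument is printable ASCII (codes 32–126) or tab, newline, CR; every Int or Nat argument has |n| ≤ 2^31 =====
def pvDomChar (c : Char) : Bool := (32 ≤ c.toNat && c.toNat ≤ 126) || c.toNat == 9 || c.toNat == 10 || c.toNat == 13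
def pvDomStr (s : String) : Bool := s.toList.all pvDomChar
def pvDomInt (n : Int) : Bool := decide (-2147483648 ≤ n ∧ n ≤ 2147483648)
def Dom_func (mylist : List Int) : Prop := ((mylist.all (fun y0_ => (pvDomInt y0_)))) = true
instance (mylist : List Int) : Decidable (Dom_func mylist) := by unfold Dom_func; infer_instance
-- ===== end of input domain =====

-- B replaces A's quadratic rescan of all prior elements by an incrementally
-- maintained sorted list queried with binary search (measurably faster).

-- ===== PORT A =====
def func (mylist : List Int) : List Int :=
  (PySem.List.enumerate mylist 0).foldl (fun output p =>
    let idx := p.1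
    let i := p.2
    let cmin := i - 10000
    let count := (PySem.List.pyRange 0 idx 1).foldl
      (fun count j => if PySem.List.pyGetD mylist j 0 ≥ cmin then count + 1 else count) (1 : Int)
    output ++ [count]) []

-- ===== PORT B =====
-- Source B's hand-written `_bisect_left` is the standard lo/hi-halving loop, ported as
-- PySem.List.bisectLeft (the same loop); `seen.insert(j, x)` is PySem.List.insert.
def funcAltStep (st : List Int × List Int) (x : Int) : List Int × List Int :=
  let seen := st.1
  let k := PySem.List.bisectLeft seen (x - 10000)
  let output := st.2 ++ [(seen.length : Int) - (k : Int) + 1]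
  let seen' := PySem.List.insert seen ((PySem.List.bisectLeft seen x : Nat) : Int) x
  (seen', output)

def func_alt (mylist : List Int) : List Int :=
  (mylist.foldl funcAltStep ([], [])).2

-- ===== PRECONDITION & SPEC =====
def Spec_func (mylist : List Int) (out : List Int) : Prop := out = func_alt mylist
instance (mylist : List Int) (out : List Int) : Decidable (Spec_func mylist out) := by unfold Spec_func; infer_instance

-- ===== CLAIM (what is proved, stated in full; the proofs are below) =====
def Claim_equal_func : Prop := ∀ (mylist : List Int), Dom_func mylist → Spec_func mylist (func mylist)

-- ===== LEMMAS AND PROOFS =====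

-- In a sorted list, the elements ≥ c are exactly those from position bisectLeft onwards.
lemma count_ge_of_sorted (s : List Int) (c : Int) (hs : s.Pairwise (· ≤ ·)) :
    s.countP (fun y => decide (c ≤ y)) = s.length - PySem.List.bisectLeft s c := by
  obtain ⟨hk, hlt, hge⟩ := PySem.List.bisectLeft_spec s c hs
  set k := PySem.List.bisectLeft s c with hkdef
  have h1 : (s.take k).countP (fun y => decide (c ≤ y)) = 0 := by
    apply List.countP_eq_zero.mpr
    intro a ha
    obtain ⟨i, hi, hval⟩ := List.mem_iff_getElem.mp ha
    have hik : i < k := by simp [List.length_take] at hi; omega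
    have hilen : i < s.length := lt_of_lt_of_le hik hk
    have := hlt i hilen hik
    rw [List.getElem_take] at hval
    simp only [decide_eq_true_eq] at *
    omega
  have h2 : (s.drop k).countP (fun y => decide (c ≤ y)) = (s.drop k).length := by
    apply List.countP_eq_length.mpr
    intro a ha
    obtain ⟨i, hi, hval⟩ := List.mem_iff_getElem.mp ha
    rw [List.getElem_drop] at hval
    have hilen : k + i < s.length := by
      have := List.length_drop (l := s) (i := k); omega
    have := hge (k + i) hilen (Nat.le_add_right _ _)
    simp only [decide_eq_true_eq] at *
    omega
  calc s.countP (fun y => decide (c ≤ y))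
      = (s.take k ++ s.drop k).countP (fun y => decide (c ≤ y)) := by rw [List.take_append_drop]
    _ = s.length - k := by
        rw [List.countP_append, h1, h2, List.length_drop]; omega

-- inserting at the bisectLeft position keeps the list sorted and adds the element
lemma insert_bisect (s : List Int) (x : Int) (hs : s.Pairwise (· ≤ ·)) :
    (PySem.List.insert s ((PySem.List.bisectLeft s x : Nat) : Int) x).Perm (x :: s) ∧
    (PySem.List.insert s ((PySem.List.bisectLeft s x : Nat) : Int) x).Pairwise (· ≤ ·) := by
  obtain ⟨hk, hlt, hge⟩ := PySem.List.bisectLeft_spec s x hs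
  set k := PySem.List.bisectLeft s x with hkdef
  rw [PySem.List.insert_natCast s k x hk]
  constructor
  · exact List.perm_middle.trans (by rw [List.take_append_drop])
  · have htd : (s.take k ++ s.drop k).Pairwise (· ≤ ·) := by rw [List.take_append_drop]; exact hs
    rw [List.pairwise_append] at htd
    obtain ⟨hp1, hp2, hcross⟩ := htd
    rw [List.pairwise_append]
    refine ⟨hp1, ?_, ?_⟩
    · rw [List.pairwise_cons]
      refine ⟨?_, hp2⟩
      intro b hb
      obtain ⟨i, hi, hval⟩ := List.mem_iff_getElem.mp hb
      rw [List.getElem_drop] at hval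
      have hilen : k + i < s.length := by
        have := List.length_drop (l := s) (i := k); omega
      have := hge (k + i) hilen (Nat.le_add_right _ _)
      omega
    · intro a ha b hb
      rcases List.mem_cons.mp hb with rfl | hb'
      · obtain ⟨i, hi, hval⟩ := List.mem_iff_getElem.mp ha
        have hik : i < k := by simp [List.length_take] at hi; omega
        have hilen : i < s.length := lt_of_lt_of_le hik hk
        have := hlt i hilen hik
        rw [List.getElem_take] at hval
        omega
      · exact hcross a ha b hb'

-- loop invariant of B: `seen` is a sorted permutation of the processed elements
lemma funcAlt_inv (ys : List Int) : ∀ (seen out : List Int), seen.Pairwise (· ≤ ·) →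
    (ys.foldl funcAltStep (seen, out)).1.Perm (seen ++ ys) ∧
    (ys.foldl funcAltStep (seen, out)).1.Pairwise (· ≤ ·) := by
  induction ys with
  | nil =>
    intro seen out hs
    constructor
    · simp
    · simpa using hs
  | cons x xs ih =>
    intro seen out hs
    obtain ⟨hperm, hsort⟩ := insert_bisect seen x hs
    rw [List.foldl_cons]
    have hstep : funcAltStep (seen, out) x =
        (PySem.List.insert seen ((PySem.List.bisectLeft seen x : Nat) : Int) x,
         out ++ [(seen.length : Int) - (PySem.List.bisectLeft seen (x - 10000) : Int) + 1]) := rfl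
    rw [hstep]
    obtain ⟨h1, h2⟩ := ih _ _ hsort
    refine ⟨h1.trans ?_, h2⟩
    exact (hperm.append_right xs).trans List.perm_middle.symm

-- B appends exactly the count of prior elements ≥ x - 10000, plus one
lemma funcAlt_append_singleton (ys : List Int) (x : Int) :
    func_alt (ys ++ [x]) =
      func_alt ys ++ [1 + ((ys.countP (fun y => decide (x - 10000 ≤ y))) : Int)] := by
  unfold func_alt
  rw [List.foldl_append]
  obtain ⟨hperm, hsort⟩ := funcAlt_inv ys [] [] (List.Pairwise.nil)
  set st := ys.foldl funcAltStep ([], []) with hst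
  have hperm' : st.1.Perm ys := by simpa using hperm
  have hcount : st.1.countP (fun y => decide (x - 10000 ≤ y)) =
      ys.countP (fun y => decide (x - 10000 ≤ y)) := hperm'.countP_eq _
  have hlen : st.1.length = ys.length := hperm'.length_eq
  have hc := count_ge_of_sorted st.1 (x - 10000) hsort
  obtain ⟨hk, -, -⟩ := PySem.List.bisectLeft_spec st.1 (x - 10000) hsort
  show (funcAltStep st x).2 = st.2 ++ _
  unfold funcAltStep
  simp only
  congr 1
  congr 1
  rw [hcount] at hc
  omega

-- the loop body of A, with the list it indexes into made explicit (defeq to A's body)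
def funcBody (xs : List Int) (output : List Int) (p : Int × Int) : List Int :=
  output ++ [(PySem.List.pyRange 0 p.1 1).foldl
    (fun c j => if PySem.List.pyGetD xs j 0 ≥ p.2 - 10000 then c + 1 else c) 1]

lemma func_eq_foldl (mylist : List Int) :
    func mylist = (PySem.List.enumerate mylist 0).foldl (funcBody mylist) [] := rfl

-- A's inner loop over range(idx) counts elements of the first n positions ≥ cmin
lemma funcA_inner (xs : List Int) (n : Nat) (hn : n ≤ xs.length) (cmin init : Int) :
    (PySem.List.pyRange 0 (n : Int) 1).foldl
      (fun c j => if PySem.List.pyGetD xs j 0 ≥ cmin then c + 1 else c) init =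
    init + ((xs.take n).countP (fun y => decide (cmin ≤ y)) : Int) := by
  induction n generalizing init with
  | zero => simp [PySem.List.pyRange_one_eq_nil]
  | succ m ih =>
    have hm : m ≤ xs.length := Nat.le_of_succ_le hn
    have hmlt : m < xs.length := hn
    have hsplit : PySem.List.pyRange 0 ((m : Int) + 1) 1
        = PySem.List.pyRange 0 (m : Int) 1 ++ [(m : Int)] :=
      PySem.List.pyRange_one_succ_right (by positivity)
    have hcast : ((m + 1 : Nat) : Int) = (m : Int) + 1 := by push_cast; ring
    rw [hcast, hsplit, List.foldl_append, ih hm]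
    have hget : PySem.List.pyGetD xs ((m : Nat) : Int) 0 = xs[m] := by
      rw [PySem.List.pyGetD_natCast]; exact List.getD_eq_getElem _ _ hmlt
    have htake : xs.take (m + 1) = xs.take m ++ [xs[m]] := by
      rw [List.take_add_one, List.getElem?_eq_getElem hmlt]; rfl
    rw [htake, List.countP_append]
    simp only [List.foldl_cons, List.foldl_nil, hget, ge_iff_le, List.countP_cons,
      List.countP_nil]
    by_cases h : cmin ≤ xs[m] <;> simp [h] <;> ring

-- A appends the same count
lemma funcA_append_singleton (ys : List Int) (x : Int) :
    func (ys ++ [x]) =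
      func ys ++ [1 + ((ys.countP (fun y => decide (x - 10000 ≤ y))) : Int)] := by
  rw [func_eq_foldl, func_eq_foldl]
  rw [PySem.List.enumerate_append, List.foldl_append]
  -- the prefix part only indexes positions < ys.length, where ys ++ [x] agrees with ys
  have hcongr : ∀ (output : List Int), ∀ p ∈ PySem.List.enumerate ys 0,
      funcBody (ys ++ [x]) output p = funcBody ys output p := by
    intro output p hp
    obtain ⟨kk, hkk, rfl⟩ := (PySem.List.mem_enumerate_iff ys 0 p).mp hp
    unfold funcBody
    congr 1
    congr 1
    apply PySem.List.foldl_congr_mem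
    intro c j hj
    have hjr := PySem.List.mem_pyRange_one.mp hj
    have h0 : 0 ≤ j := hjr.1
    have hjlt : j < 0 + (kk : Int) := hjr.2
    have hjn : j.toNat < ys.length := by omega
    rw [PySem.List.pyGetD_eq_getElem _ 0 h0 (by simp; omega),
        PySem.List.pyGetD_eq_getElem _ 0 h0 (by exact_mod_cast (by omega : (j : Int) < (ys.length : Int))),
        List.getElem_append_left]
  rw [PySem.List.foldl_congr_mem _ _ _ _ hcongr]
  -- the appended element: index ys.length, value x
  rw [show PySem.List.enumerate [x] (0 + (ys.length : Int))
        = [((0 + (ys.length : Int)), x)] from rfl]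
  rw [List.foldl_cons, List.foldl_nil]
  unfold funcBody
  simp only [zero_add]
  congr 1
  congr 1
  have hcongr2 : ∀ (c : Int), ∀ j ∈ PySem.List.pyRange 0 ((ys.length : Int)) 1,
      (fun c j => if PySem.List.pyGetD (ys ++ [x]) j 0 ≥ x - 10000 then c + 1 else c) c j
      = (fun c j => if PySem.List.pyGetD ys j 0 ≥ x - 10000 then c + 1 else c) c j := by
    intro c j hj
    have hjr := PySem.List.mem_pyRange_one.mp hj
    have h0 : 0 ≤ j := hjr.1
    have hjn : j.toNat < ys.length := by omega
    simp only
    rw [PySem.List.pyGetD_eq_getElem _ 0 h0 (by simp; omega),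
        PySem.List.pyGetD_eq_getElem _ 0 h0 (by exact_mod_cast (by omega : (j : Int) < (ys.length : Int))),
        List.getElem_append_left]
  rw [PySem.List.foldl_congr_mem _ _ _ _ hcongr2]
  have := funcA_inner ys ys.length (le_refl _) (x - 10000) 1
  rw [List.take_length] at this
  simpa using this

lemma func_eq_func_alt (mylist : List Int) : func mylist = func_alt mylist := by
  induction mylist using List.reverseRecOn with
  | nil => rfl
  | append_singleton ys x ih =>
    rw [funcA_append_singleton, funcAlt_append_singleton, ih]

-- ===== VERDICT (by name: the statement is the Claim_ definition above) =====
theorem func_spec : Claim_equal_func := by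
  intro mylist _
  unfold Spec_func
  exact func_eq_func_alt mylist
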